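-- pv_equiv track=rewrite | github.com/TheAuditorTool/Auditor | theauditor/commands/refactor.py | _aggregate_schema_counts
-- ===== SOURCE A (Python) =====
-- from collections import Counter, defaultdict
-- from typing import Any
--
-- def _aggregate_schema_counts(
--     mismatches: dict[str, list[dict[str, Any]]],
-- ) -> dict[str, dict[str, int]]:
--     """Aggregate schema mismatch counts per file."""
--     counts: dict[str, dict[str, int]] = defaultdict(
--         lambda: {"tables": 0, "columns": 0, "renamed": 0, "total": 0}
--     )
--
--     for item in mismatches.get("removed_tables", []):
--         file_path = item.get("file")
--         if not file_path:
--             continue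
--         counts[file_path]["tables"] += 1
--
--     for item in mismatches.get("removed_columns", []):
--         file_path = item.get("file")
--         if not file_path:
--             continue
--         counts[file_path]["columns"] += 1
--
--     for item in mismatches.get("renamed_items", []):
--         file_path = item.get("file")
--         if not file_path:
--             continue
--         counts[file_path]["renamed"] += 1
--
--     for info in counts.values():
--         info["total"] = info["tables"] + info["columns"] + info["renamed"]
--
--     return counts
-- ===== SOURCE B (Python) =====
-- from collections import defaultdict
--
--
-- def _aggregate_schema_counts(mismatches):
--     """Aggregate schema mismatch counts per file.
--
--     Flattens the three categories into one (file, kind) event list, then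
--     builds each file's row by counting queries over that list.
--     """
--     events = [
--         (item.get("file"), kind)
--         for key, kind in (
--             ("removed_tables", "tables"),
--             ("removed_columns", "columns"),
--             ("renamed_items", "renamed"),
--         )
--         for item in mismatches.get(key, [])
--         if item.get("file")
--     ]
--     counts = defaultdict(lambda: {"tables": 0, "columns": 0, "renamed": 0, "total": 0})
--     for file_path in dict.fromkeys(f for f, _ in events):
--         t = events.count((file_path, "tables"))
--         c = events.count((file_path, "columns"))
--         r = events.count((file_path, "renamed"))
--         counts[file_path] = {"tables": t, "columns": c, "renamed": r, "total": t + c + r}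
--     return counts
-- ===== Notes on version B (the rewrite author's own statement) =====
-- stated objective: alternative
-- what changed: B flattens the three categories into one (file, kind) event list, dedupes the files in first-occurrence order, and computes each file's row by counting queries over the event list, instead of A's incremental per-item accumulation plus a final total pass; trades A's O(n) pass for O(n*m) counting queries.
import Mathlib
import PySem

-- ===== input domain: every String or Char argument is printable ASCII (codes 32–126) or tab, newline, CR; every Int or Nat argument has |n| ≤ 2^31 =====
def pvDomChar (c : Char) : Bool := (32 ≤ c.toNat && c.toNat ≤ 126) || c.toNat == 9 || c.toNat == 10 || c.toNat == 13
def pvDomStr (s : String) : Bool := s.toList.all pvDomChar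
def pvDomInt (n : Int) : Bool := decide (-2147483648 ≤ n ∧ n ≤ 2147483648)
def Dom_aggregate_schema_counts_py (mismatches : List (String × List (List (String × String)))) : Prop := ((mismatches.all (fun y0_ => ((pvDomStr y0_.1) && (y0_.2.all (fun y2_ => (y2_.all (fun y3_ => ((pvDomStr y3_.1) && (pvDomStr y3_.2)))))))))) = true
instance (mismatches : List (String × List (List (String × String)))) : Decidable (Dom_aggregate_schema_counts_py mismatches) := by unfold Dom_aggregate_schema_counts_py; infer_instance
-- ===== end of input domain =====

-- B replaces A's incremental per-item accumulation (three category loops + final total pass) by a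
-- group-by-count strategy: flatten to one (file, kind) event list, dedupe files, count per file
-- (objective: alternative; not faster).

-- ===== PORT A =====
-- the defaultdict's default factory value
def pvDefault : PySem.Dict String Int :=
  PySem.Dict.mk [("tables", 0), ("columns", 0), ("renamed", 0), ("total", 0)]

-- one iteration of one of A's three category loops: `counts[file_path][field] += 1`
-- (defaultdict access materialises the default entry; the in-place mutation is the re-insert)
def pvStepA (field : String) (c : PySem.Dict String (PySem.Dict String Int))
    (item : List (String × String)) : PySem.Dict String (PySem.Dict String Int) :=
  let fp := PySem.Dict.getD (PySem.Dict.mk item) "file" ""   -- item.get("file"); None/"" are falsy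
  if fp = "" then c
  else
    let info := PySem.Dict.getD c fp pvDefault
    PySem.Dict.insert c fp (PySem.Dict.insert info field (PySem.Dict.getD info field 0 + 1))

-- A's final pass body: info["total"] = info["tables"] + info["columns"] + info["renamed"]
def pvFix (info : PySem.Dict String Int) : PySem.Dict String Int :=
  PySem.Dict.insert info "total"
    (PySem.Dict.getD info "tables" 0 + PySem.Dict.getD info "columns" 0 + PySem.Dict.getD info "renamed" 0)

def aggregate_schema_counts_py (mismatches : List (String × List (List (String × String)))) : List (String × List (String × Int)) :=
  let m := PySem.Dict.mk mismatches
  let counts : PySem.Dict String (PySem.Dict String Int) := PySem.Dict.empty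
  let counts := (PySem.Dict.getD m "removed_tables" []).foldl (pvStepA "tables") counts
  let counts := (PySem.Dict.getD m "removed_columns" []).foldl (pvStepA "columns") counts
  let counts := (PySem.Dict.getD m "renamed_items" []).foldl (pvStepA "renamed") counts
  (counts.items).map (fun p => (p.1, (pvFix p.2).items))

-- ===== PORT B =====
-- the (key, kind) pairs of B's flattening comprehension
def pvSpec : List (String × String) :=
  [("removed_tables", "tables"), ("removed_columns", "columns"), ("renamed_items", "renamed")]

def aggregate_schema_counts_py_alt (mismatches : List (String × List (List (String × String)))) : List (String × List (String × Int)) :=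
  let m := PySem.Dict.mk mismatches
  -- events = [(item.get("file"), kind) for key, kind in spec for item in mismatches.get(key, []) if item.get("file")]
  let events : List (String × String) := pvSpec.flatMap (fun kf =>
    (PySem.Dict.getD m kf.1 []).filterMap (fun item =>
      let fp := PySem.Dict.getD (PySem.Dict.mk item) "file" ""
      if fp = "" then none else some (fp, kf.2)))
  -- for file_path in dict.fromkeys(f for f, _ in events): counts[file_path] = {…counts…}
  let counts := (PySem.List.dedup (events.map Prod.fst)).foldl
    (fun c f =>
      PySem.Dict.insert c f (PySem.Dict.mk
        [("tables", (events.count (f, "tables") : Int)),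
         ("columns", (events.count (f, "columns") : Int)),
         ("renamed", (events.count (f, "renamed") : Int)),
         ("total", (events.count (f, "tables") : Int) + (events.count (f, "columns") : Int)
           + (events.count (f, "renamed") : Int))]))
    (PySem.Dict.empty : PySem.Dict String (PySem.Dict String Int))
  (counts.items).map (fun p => (p.1, p.2.items))

-- ===== PRECONDITION & SPEC =====
def Spec_aggregate_schema_counts_py (mismatches : List (String × List (List (String × String)))) (out : List (String × List (String × Int))) : Prop := out = aggregate_schema_counts_py_alt mismatches
instance (mismatches : List (String × List (List (String × String)))) (out : List (String × List (String × Int))) : Decidable (Spec_aggregate_schema_counts_py mismatches out) := by unfold Spec_aggregate_schema_counts_py; infer_instance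

-- ===== CLAIM (what is proved, stated in full; the proofs are below) =====
def Claim_equal_aggregate_schema_counts_py : Prop := ∀ (mismatches : List (String × List (List (String × String)))), Dom_aggregate_schema_counts_py mismatches → Spec_aggregate_schema_counts_py mismatches (aggregate_schema_counts_py mismatches)



-- ===== LEMMAS AND PROOFS =====

-- a four-key counts row
def pvInfo (t c r x : Int) : PySem.Dict String Int :=
  PySem.Dict.mk [("tables", t), ("columns", c), ("renamed", r), ("total", x)]

-- A's loop body re-expressed on an already-extracted event (fp, field)
def pvAStep (c : PySem.Dict String (PySem.Dict String Int)) (e : String × String) :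
    PySem.Dict String (PySem.Dict String Int) :=
  let info := PySem.Dict.getD c e.1 pvDefault
  PySem.Dict.insert c e.1 (PySem.Dict.insert info e.2 (PySem.Dict.getD info e.2 0 + 1))

-- the events one of A's category loops actually processes
def pvEvts (L : List (List (String × String))) (fld : String) : List (String × String) :=
  L.filterMap (fun item =>
    let fp := PySem.Dict.getD (PySem.Dict.mk item) "file" ""
    if fp = "" then none else some (fp, fld))

theorem pvLoopA_eq_eventFold (fld : String) (L : List (List (String × String)))
    (c : PySem.Dict String (PySem.Dict String Int)) :
    L.foldl (pvStepA fld) c = (pvEvts L fld).foldl pvAStep c := by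
  induction L generalizing c with
  | nil => rfl
  | cons a L ih =>
    simp only [pvEvts, List.filterMap_cons] at *
    by_cases h : PySem.Dict.getD (PySem.Dict.mk a) "file" "" = ""
    · simp only [List.foldl_cons, pvStepA, h, if_pos]
      exact ih c
    · simp only [List.foldl_cons, pvStepA, h, if_false]
      rw [ih]
      rfl

theorem pvEvts_snd (L : List (List (String × String))) (fld : String) :
    ∀ e ∈ pvEvts L fld, e.2 = fld := by
  intro e he
  simp only [pvEvts, List.mem_filterMap] at he
  obtain ⟨item, -, h⟩ := he
  by_cases hfp : PySem.Dict.getD (PySem.Dict.mk item) "file" "" = "" <;>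
    simp only [hfp, if_pos, if_false, reduceCtorEq, Option.some.injEq] at h
  exact (congrArg Prod.snd h).symm ▸ rfl

-- the canonical row value of file f after events E (total still 0, as in A's loops)
def pvF (E : List (String × String)) (f : String) : PySem.Dict String Int :=
  pvInfo (E.count (f, "tables")) (E.count (f, "columns")) (E.count (f, "renamed")) 0

theorem pvGetD_mk_map (files : List String) (F : String → PySem.Dict String Int)
    (f : String) (hnd : files.Nodup) :
    PySem.Dict.getD (PySem.Dict.mk (files.map (fun g => (g, F g)))) f pvDefault
      = if f ∈ files then F f else pvDefault := by
  induction files with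
  | nil => simp [PySem.Dict.getD, PySem.Dict.get?]
  | cons g files ih =>
    simp only [List.nodup_cons] at hnd
    by_cases h : g = f
    · subst h
      rw [if_pos (List.mem_cons_self)]
      show (Option.map _ (List.find? _ _)).getD _ = F g
      rw [List.map_cons, List.find?_cons_of_pos (by simp)]
      rfl
    · rw [show PySem.Dict.getD (PySem.Dict.mk ((g :: files).map fun g => (g, F g))) f pvDefault
            = PySem.Dict.getD (PySem.Dict.mk (files.map fun g => (g, F g))) f pvDefault from by
        simp only [PySem.Dict.getD, PySem.Dict.get?, List.map_cons]
        rw [List.find?_cons_of_neg (by simp [h])]]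
      rw [ih hnd.2]
      by_cases hf : f ∈ files
      · rw [if_pos hf, if_pos (List.mem_cons_of_mem _ hf)]
      · rw [if_neg hf, if_neg (fun hmem =>
          ((List.mem_cons.1 hmem).elim (fun hfg => h hfg.symm) hf))]

theorem pvContains_mk_map (files : List String) (F : String → PySem.Dict String Int) (f : String) :
    PySem.Dict.contains (PySem.Dict.mk (files.map (fun g => (g, F g)))) f = decide (f ∈ files) := by
  simp [PySem.Dict.contains, List.any_eq]

-- inserting / reading one concrete field of a row
theorem pvInsert_info_tables (t c r x w : Int) :
    PySem.Dict.insert (pvInfo t c r x) "tables" w = pvInfo w c r x := by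
  simp [pvInfo, PySem.Dict.insert, PySem.Dict.contains]
theorem pvInsert_info_columns (t c r x w : Int) :
    PySem.Dict.insert (pvInfo t c r x) "columns" w = pvInfo t w r x := by
  simp [pvInfo, PySem.Dict.insert, PySem.Dict.contains]
theorem pvInsert_info_renamed (t c r x w : Int) :
    PySem.Dict.insert (pvInfo t c r x) "renamed" w = pvInfo t c w x := by
  simp [pvInfo, PySem.Dict.insert, PySem.Dict.contains]
theorem pvInsert_info_total (t c r x w : Int) :
    PySem.Dict.insert (pvInfo t c r x) "total" w = pvInfo t c r w := by
  simp [pvInfo, PySem.Dict.insert, PySem.Dict.contains]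

theorem pvGetD_info_tables (t c r x : Int) : PySem.Dict.getD (pvInfo t c r x) "tables" 0 = t := by
  simp [pvInfo, PySem.Dict.getD, PySem.Dict.get?]
theorem pvGetD_info_columns (t c r x : Int) : PySem.Dict.getD (pvInfo t c r x) "columns" 0 = c := by
  simp [pvInfo, PySem.Dict.getD, PySem.Dict.get?]
theorem pvGetD_info_renamed (t c r x : Int) : PySem.Dict.getD (pvInfo t c r x) "renamed" 0 = r := by
  simp [pvInfo, PySem.Dict.getD, PySem.Dict.get?]

theorem pvDefault_eq : pvDefault = pvInfo 0 0 0 0 := rfl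

theorem pvFix_info (t c r x : Int) : pvFix (pvInfo t c r x) = pvInfo t c r (t + c + r) := by
  rw [pvFix, pvGetD_info_tables, pvGetD_info_columns, pvGetD_info_renamed, pvInsert_info_total]

theorem pvCount_append_singleton (E : List (String × String)) (e p : String × String) :
    (E ++ [e]).count p = E.count p + (if p = e then 1 else 0) := by
  rw [List.count_append]
  by_cases hpe : p = e
  · subst hpe; simp
  · rw [if_neg hpe, show List.count p [e] = 0 from List.count_eq_zero.2 (by simp [hpe])]

theorem pvCount_zero_of_not_mem_fst (E : List (String × String)) (f fld : String)
    (h : f ∉ E.map Prod.fst) : E.count (f, fld) = 0 := by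
  rw [List.count_eq_zero]
  intro hmem
  exact h (List.mem_map_of_mem hmem)

theorem pvF_append_of_ne (E : List (String × String)) (e : String × String) (g : String)
    (hg : g ≠ e.1) : pvF (E ++ [e]) g = pvF E g := by
  obtain ⟨e1, e2⟩ := e
  simp only [pvF, pvCount_append_singleton]
  have h1 : ¬ ((g, "tables") = (e1, e2)) := fun h => hg (by cases h; rfl)
  have h2 : ¬ ((g, "columns") = (e1, e2)) := fun h => hg (by cases h; rfl)
  have h3 : ¬ ((g, "renamed") = (e1, e2)) := fun h => hg (by cases h; rfl)
  simp [h1, h2, h3]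

theorem pvF_append_self (E : List (String × String)) (e1 e2 : String)
    (he : e2 = "tables" ∨ e2 = "columns" ∨ e2 = "renamed") :
    pvF (E ++ [(e1, e2)]) e1
      = PySem.Dict.insert (pvF E e1) e2 (PySem.Dict.getD (pvF E e1) e2 0 + 1) := by
  rcases he with rfl | rfl | rfl
  · rw [show pvF E e1 = pvInfo (E.count (e1, "tables")) (E.count (e1, "columns"))
        (E.count (e1, "renamed")) 0 from rfl, pvGetD_info_tables, pvInsert_info_tables]
    simp [pvF, pvInfo]
  · rw [show pvF E e1 = pvInfo (E.count (e1, "tables")) (E.count (e1, "columns"))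
        (E.count (e1, "renamed")) 0 from rfl, pvGetD_info_columns, pvInsert_info_columns]
    simp [pvF, pvInfo]
  · rw [show pvF E e1 = pvInfo (E.count (e1, "tables")) (E.count (e1, "columns"))
        (E.count (e1, "renamed")) 0 from rfl, pvGetD_info_renamed, pvInsert_info_renamed]
    simp [pvF, pvInfo]

-- one event applied to the canonical table is the canonical table of the extended event list
theorem pvAStep_canon (E : List (String × String)) (e : String × String)
    (he : e.2 = "tables" ∨ e.2 = "columns" ∨ e.2 = "renamed") :
    pvAStep (PySem.Dict.mk ((PySem.List.dedup (E.map Prod.fst)).map (fun f => (f, pvF E f)))) e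
      = PySem.Dict.mk ((PySem.List.dedup ((E ++ [e]).map Prod.fst)).map
          (fun f => (f, pvF (E ++ [e]) f))) := by
  obtain ⟨e1, e2⟩ := e
  have hnd : (PySem.List.dedup (E.map Prod.fst)).Nodup := PySem.List.nodup_dedup _
  rw [pvAStep]
  rw [pvGetD_mk_map _ _ _ hnd]
  have hfiles : ((E ++ [(e1, e2)]).map Prod.fst) = E.map Prod.fst ++ [e1] := by simp
  by_cases hf : e1 ∈ PySem.List.dedup (E.map Prod.fst)
  · rw [if_pos hf]
    have hfiles' : PySem.List.dedup ((E ++ [(e1, e2)]).map Prod.fst)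
        = PySem.List.dedup (E.map Prod.fst) := by
      rw [hfiles]
      simp only [PySem.List.dedup_eq_ofList, PySem.Set.ofList_append_singleton]
      exact PySem.Set.add_of_mem (by simpa [PySem.List.dedup_eq_ofList] using hf)
    rw [hfiles']
    have hcontains : PySem.Dict.contains
        (PySem.Dict.mk ((PySem.List.dedup (E.map Prod.fst)).map (fun f => (f, pvF E f)))) e1
          = true := by rw [pvContains_mk_map]; simpa using hf
    rw [PySem.Dict.insert, hcontains]
    simp only [if_pos]
    congr 1
    rw [List.map_map]
    apply List.map_congr_left
    intro g hg
    simp only [Function.comp_def, beq_iff_eq]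
    by_cases hge : g = e1
    · subst hge
      rw [if_pos rfl, pvF_append_self E g e2 he]
    · rw [if_neg hge, pvF_append_of_ne E (e1, e2) g hge]
  · rw [if_neg hf]
    have he1 : e1 ∉ E.map Prod.fst := fun h => hf (by simpa [PySem.List.dedup_eq_ofList, PySem.Set.mem_ofList] using h)
    have hfiles' : PySem.List.dedup ((E ++ [(e1, e2)]).map Prod.fst)
        = PySem.List.dedup (E.map Prod.fst) ++ [e1] := by
      rw [hfiles]
      simp only [PySem.List.dedup_eq_ofList, PySem.Set.ofList_append_singleton]
      exact PySem.Set.add_of_not_mem (by simpa [PySem.List.dedup_eq_ofList] using hf)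
    rw [hfiles']
    have hcontains : PySem.Dict.contains
        (PySem.Dict.mk ((PySem.List.dedup (E.map Prod.fst)).map (fun f => (f, pvF E f)))) e1
          = false := by rw [pvContains_mk_map]; simpa using hf
    rw [PySem.Dict.insert, hcontains]
    simp only [Bool.false_eq_true, if_false, List.map_append, List.map_cons, List.map_nil]
    have h0 : pvF E e1 = pvDefault := by
      rw [pvDefault_eq]
      simp [pvF, pvCount_zero_of_not_mem_fst E e1 _ he1]
    congr 1
    congr 1
    · apply List.map_congr_left
      intro g hg
      have hge : g ≠ e1 := fun h => hf (h ▸ hg)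
      rw [pvF_append_of_ne E (e1, e2) g hge]
    · rw [pvF_append_self E e1 e2 he, h0]

-- the main invariant: A's event fold from empty is the canonical per-file table
theorem pvFold_canon (E : List (String × String))
    (hE : ∀ e ∈ E, e.2 = "tables" ∨ e.2 = "columns" ∨ e.2 = "renamed") :
    E.foldl pvAStep PySem.Dict.empty
      = PySem.Dict.mk ((PySem.List.dedup (E.map Prod.fst)).map (fun f => (f, pvF E f))) := by
  induction E using List.reverseRecOn with
  | nil => rfl
  | append_singleton E e ih =>
    rw [List.foldl_append, List.foldl_cons, List.foldl_nil]
    rw [ih (fun x hx => hE x (List.mem_append_left _ hx))]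
    exact pvAStep_canon E e (hE e (List.mem_append_right _ (List.mem_singleton.2 rfl)))

-- ===== VERDICT (by name: the statement is the Claim_ definition above) =====
theorem aggregate_schema_counts_py_spec : Claim_equal_aggregate_schema_counts_py := by
  intro mismatches _
  unfold Spec_aggregate_schema_counts_py aggregate_schema_counts_py aggregate_schema_counts_py_alt
  simp only [pvSpec, List.flatMap_cons, List.flatMap_nil, List.append_nil]
  set m := PySem.Dict.mk mismatches
  set E : List (String × String) :=
    pvEvts (PySem.Dict.getD m "removed_tables" []) "tables" ++
      (pvEvts (PySem.Dict.getD m "removed_columns" []) "columns" ++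
        pvEvts (PySem.Dict.getD m "renamed_items" []) "renamed") with hEdef
  have hevents : (PySem.Dict.getD m "removed_tables" []).filterMap (fun item =>
        let fp := PySem.Dict.getD (PySem.Dict.mk item) "file" ""
        if fp = "" then none else some (fp, "tables")) ++
      ((PySem.Dict.getD m "removed_columns" []).filterMap (fun item =>
        let fp := PySem.Dict.getD (PySem.Dict.mk item) "file" ""
        if fp = "" then none else some (fp, "columns")) ++
      (PySem.Dict.getD m "renamed_items" []).filterMap (fun item =>
        let fp := PySem.Dict.getD (PySem.Dict.mk item) "file" ""
        if fp = "" then none else some (fp, "renamed"))) = E := rfl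
  rw [hevents]
  have hfoldA : (PySem.Dict.getD m "renamed_items" []).foldl (pvStepA "renamed")
      ((PySem.Dict.getD m "removed_columns" []).foldl (pvStepA "columns")
        ((PySem.Dict.getD m "removed_tables" []).foldl (pvStepA "tables") PySem.Dict.empty))
      = E.foldl pvAStep PySem.Dict.empty := by
    rw [pvLoopA_eq_eventFold, pvLoopA_eq_eventFold, pvLoopA_eq_eventFold]
    rw [hEdef, List.foldl_append, List.foldl_append]
  rw [hfoldA]
  have hE : ∀ e ∈ E, e.2 = "tables" ∨ e.2 = "columns" ∨ e.2 = "renamed" := by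
    intro e he
    rw [hEdef] at he
    rcases List.mem_append.1 he with h | h
    · exact Or.inl (pvEvts_snd _ _ e h)
    · rcases List.mem_append.1 h with h | h
      · exact Or.inr (Or.inl (pvEvts_snd _ _ e h))
      · exact Or.inr (Or.inr (pvEvts_snd _ _ e h))
  rw [pvFold_canon E hE]
  have hfoldB : (PySem.List.dedup (E.map Prod.fst)).foldl
      (fun c f => PySem.Dict.insert c f (PySem.Dict.mk
        [("tables", (E.count (f, "tables") : Int)),
         ("columns", (E.count (f, "columns") : Int)),
         ("renamed", (E.count (f, "renamed") : Int)),
         ("total", (E.count (f, "tables") : Int) + (E.count (f, "columns") : Int)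
           + (E.count (f, "renamed") : Int))]))
      (PySem.Dict.empty : PySem.Dict String (PySem.Dict String Int)) =
    PySem.Dict.mk ((PySem.List.dedup (E.map Prod.fst)).map (fun f => (f,
      PySem.Dict.mk
        [("tables", (E.count (f, "tables") : Int)),
         ("columns", (E.count (f, "columns") : Int)),
         ("renamed", (E.count (f, "renamed") : Int)),
         ("total", (E.count (f, "tables") : Int) + (E.count (f, "columns") : Int)
           + (E.count (f, "renamed") : Int))]))) := by
    have h := PySem.Dict.items_foldl_insert_fresh (PySem.List.dedup (E.map Prod.fst))
      (fun f => f)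
      (fun f => PySem.Dict.mk
        [("tables", (E.count (f, "tables") : Int)),
         ("columns", (E.count (f, "columns") : Int)),
         ("renamed", (E.count (f, "renamed") : Int)),
         ("total", (E.count (f, "tables") : Int) + (E.count (f, "columns") : Int)
           + (E.count (f, "renamed") : Int))])
      PySem.Dict.empty
      (fun a _ => by simp [PySem.Dict.contains, PySem.Dict.empty])
      (by simpa using PySem.List.nodup_dedup (E.map Prod.fst))
    exact congrArg PySem.Dict.mk (by simpa using h)
  rw [hfoldB]
  rw [List.map_map, List.map_map]
  apply List.map_congr_left
  intro f hf
  simp only [Function.comp_def]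
  rw [show pvF E f = pvInfo (E.count (f, "tables")) (E.count (f, "columns"))
        (E.count (f, "renamed")) 0 from rfl, pvFix_info]
  rfl
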